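-- pv_equiv track=rewrite | github.com/0rhtrht0/ft_transandance | backend/python/app/api/routes/messages.py | _build_self_message_notification_title
-- ===== SOURCE A (Python) =====
-- def _build_self_message_notification_title(recipient_labels: list[str]) -> str:
--     labels = [label for label in recipient_labels if str(label or "").strip()]
--     if not labels:
--         return "Conversation"
--     if len(labels) == 1:
--         return labels[0]
--     if len(labels) == 2:
--         return f"{labels[0]}, {labels[1]}"
--     return f"{labels[0]}, {labels[1]} +{len(labels) - 2}"
-- ===== SOURCE B (Python) =====
-- def _build_self_message_notification_title(recipient_labels: list[str]) -> str:
--     # Single pass with a bounded accumulator: keep only the first two non-blank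
--     # labels and a count of the overflow; never materialize the filtered list.
--     first = None
--     second = None
--     extra = 0
--     for label in recipient_labels:
--         if not str(label or "").strip():
--             continue
--         if first is None:
--             first = label
--         elif second is None:
--             second = label
--         else:
--             extra += 1
--     if first is None:
--         return "Conversation"
--     if second is None:
--         return first
--     suffix = f" +{extra}" if extra else ""
--     return f"{first}, {second}{suffix}"
-- ===== Notes on version B (the rewrite author's own statement) =====
-- stated objective: alternative
-- what changed: Replaces A's filter-then-branch-on-count structure with a single pass that maintains a bounded accumulator (first two non-blank labels plus an overflow counter) and formats from that state, never building the filtered list.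
import Mathlib
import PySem

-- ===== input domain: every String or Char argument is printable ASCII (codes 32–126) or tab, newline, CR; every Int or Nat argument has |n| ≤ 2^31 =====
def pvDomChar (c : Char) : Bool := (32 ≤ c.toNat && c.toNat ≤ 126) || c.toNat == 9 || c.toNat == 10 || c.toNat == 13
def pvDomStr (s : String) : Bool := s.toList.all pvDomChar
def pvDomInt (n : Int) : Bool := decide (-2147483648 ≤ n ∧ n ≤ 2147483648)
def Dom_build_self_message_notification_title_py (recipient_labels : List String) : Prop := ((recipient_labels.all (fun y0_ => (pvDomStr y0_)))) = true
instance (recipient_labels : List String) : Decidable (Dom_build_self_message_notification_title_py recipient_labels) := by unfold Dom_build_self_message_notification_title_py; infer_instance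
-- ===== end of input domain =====

-- B: single pass keeping only the first two non-blank labels and an overflow counter, instead of A's filter-then-branch-on-count (alternative decomposition, O(1) extra space).


-- ===== PORT A =====
-- Port of A: filter the non-blank labels, then four count-branches.
def build_self_message_notification_title_py (recipient_labels : List String) : String :=
  let labels := recipient_labels.filter (fun label => PySem.Str.strip label ≠ "")
  if labels.length = 0 then "Conversation"
  else if labels.length = 1 then labels.headD ""
  else if labels.length = 2 then labels.headD "" ++ ", " ++ (labels.drop 1).headD ""
  else labels.headD "" ++ ", " ++ (labels.drop 1).headD "" ++ " +" ++ PySem.Int.toStr ((labels.length : Int) - 2)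

-- ===== PORT B =====
-- Port of B's loop body: skip blanks, fill the first two slots, then count overflow.
def bTitleStep (st : Option String × Option String × Nat) (label : String) :
    Option String × Option String × Nat :=
  if PySem.Str.strip label = "" then st
  else
    match st with
    | (none, s, e) => (some label, s, e)
    | (some f, none, e) => (some f, some label, e)
    | (some f, some s, e) => (some f, some s, e + 1)

-- Port of B: one fold over the input with the bounded accumulator, then format.
def build_self_message_notification_title_py_alt (recipient_labels : List String) : String :=
  match recipient_labels.foldl bTitleStep (none, none, 0) with
  | (none, _, _) => "Conversation"
  | (some f, none, _) => f
  | (some f, some s, e) =>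
      let suffix := if e ≠ 0 then " +" ++ PySem.Int.toStr (e : Int) else ""
      f ++ ", " ++ s ++ suffix

-- ===== PRECONDITION & SPEC =====
def Spec_build_self_message_notification_title_py (recipient_labels : List String) (out : String) : Prop := out = build_self_message_notification_title_py_alt recipient_labels
instance (recipient_labels : List String) (out : String) : Decidable (Spec_build_self_message_notification_title_py recipient_labels out) := by unfold Spec_build_self_message_notification_title_py; infer_instance

-- ===== CLAIM (what is proved, stated in full; the proofs are below) =====
def Claim_equal_build_self_message_notification_title_py : Prop := ∀ (recipient_labels : List String), Dom_build_self_message_notification_title_py recipient_labels → Spec_build_self_message_notification_title_py recipient_labels (build_self_message_notification_title_py recipient_labels)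

-- ===== LEMMAS AND PROOFS =====

-- Folding the step over any list equals folding it over the list's non-blank filter
-- (the step is the identity on blank labels).
lemma foldl_bTitleStep_filter (xs : List String) (st : Option String × Option String × Nat) :
    xs.foldl bTitleStep st
      = (xs.filter (fun label => PySem.Str.strip label ≠ "")).foldl bTitleStep st := by
  induction xs generalizing st with
  | nil => rfl
  | cons a t ih =>
      by_cases h : PySem.Str.strip a = ""
      · simp [h, List.foldl_cons, bTitleStep, ih]
      · simp [h, List.foldl_cons, ih]

-- Once both slots are full, folding a list of non-blank labels only adds its length.
lemma foldl_bTitleStep_full (l : List String) : ∀ (f s : String) (e : Nat),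
    (∀ x ∈ l, PySem.Str.strip x ≠ "") →
    l.foldl bTitleStep (some f, some s, e) = (some f, some s, e + l.length) := by
  induction l with
  | nil => intro f s e _; rfl
  | cons a t ih =>
      intro f s e hl
      have ha := hl a (by simp)
      have ht : ∀ x ∈ t, PySem.Str.strip x ≠ "" := fun x hx => hl x (by simp [hx])
      rw [List.foldl_cons, show bTitleStep (some f, some s, e) a = (some f, some s, e + 1)
            from by simp [bTitleStep, ha], ih f s (e + 1) ht]
      simp
      omega

-- A's four count-branches agree with B's formatting of the final accumulator state,
-- for any list of non-blank labels.
set_option maxHeartbeats 1000000 in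
lemma body_eq (l : List String) (hl : ∀ x ∈ l, PySem.Str.strip x ≠ "") :
    (if l.length = 0 then "Conversation"
     else if l.length = 1 then l.headD ""
     else if l.length = 2 then l.headD "" ++ ", " ++ (l.drop 1).headD ""
     else l.headD "" ++ ", " ++ (l.drop 1).headD "" ++ " +" ++ PySem.Int.toStr ((l.length : Int) - 2))
    = (match l.foldl bTitleStep (none, none, 0) with
       | (none, _, _) => "Conversation"
       | (some f, none, _) => f
       | (some f, some s, e) =>
           let suffix := if e ≠ 0 then " +" ++ PySem.Int.toStr (e : Int) else ""
           f ++ ", " ++ s ++ suffix) := by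
  rcases l with _ | ⟨a, _ | ⟨b, _ | ⟨c, t⟩⟩⟩
  · rfl
  · simp [List.foldl_cons, bTitleStep, hl a (by simp)]
  · have ha := hl a (by simp)
    have hb := hl b (by simp)
    simp [List.foldl_cons, bTitleStep, ha, hb]
  · have ha := hl a (by simp)
    have hb := hl b (by simp)
    have ht : ∀ x ∈ c :: t, PySem.Str.strip x ≠ "" := by
      intro x hx
      apply hl
      simp only [List.mem_cons] at hx ⊢
      tauto
    rw [List.foldl_cons, List.foldl_cons,
      show bTitleStep (bTitleStep (none, none, 0) a) b = (some a, some b, 0)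
        from by simp [bTitleStep, ha, hb],
      foldl_bTitleStep_full _ a b 0 ht]
    have hlen : (((t.length : Int) + 1 + 1 + 1) - 2) = (((t.length : Nat) + 1 : Nat) : Int) := by
      push_cast
      ring
    simp [hlen, String.append_assoc]

theorem build_self_message_notification_title_py_spec_aux (recipient_labels : List String) :
    build_self_message_notification_title_py recipient_labels
      = build_self_message_notification_title_py_alt recipient_labels := by
  unfold build_self_message_notification_title_py build_self_message_notification_title_py_alt
  rw [foldl_bTitleStep_filter]
  exact body_eq _ (fun x hx => by simpa using (List.mem_filter.mp hx).2)

-- ===== VERDICT (by name: the statement is the Claim_ definition above) =====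
theorem build_self_message_notification_title_py_spec : Claim_equal_build_self_message_notification_title_py := by
  intro recipient_labels _
  exact build_self_message_notification_title_py_spec_aux recipient_labels
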